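-- pv_equiv track=rewrite | github.com/imwangxiaoxin/Official-document-proofreading | Tool.py | eraseone
-- ===== SOURCE A (Python) =====
-- def eraseline(sen): #  ***** -> [**_**,*]
--     ds = []
--     ts = []
--     for bi in range(len(sen)):
--         d = [" ", " ", " ", " ", " ", ]
--         tgt = sen[bi];
--         for i in range(5):
--             si = bi - 2 + i
--             if si < 0 or si >= len(sen):
--                 continue
--             d[i] = sen[si]
--         d[2] = "_"
--         ds.append(d)
--         ts.append(tgt)
--     return ds, ts
--
-- def eraseone(sens):  # 把句子中的某个词剪切出来
--     data = []
--     lable = []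
--     for sen in sens:
--         if len(sen) < 3:
--             continue
--         d, tgt = eraseline(sen)
--         data = data + d
--         lable = lable + tgt
--     return data, lable
-- ===== SOURCE B (Python) =====
-- def eraseone(sens):  # padded-slice re-implementation: pad each sentence with 2 blanks on each side, then slice 5-wide windows
--     data = []
--     lable = []
--     for sen in sens:
--         if len(sen) < 3:
--             continue
--         pad = [" ", " "] + list(sen) + [" ", " "]
--         for bi in range(len(sen)):
--             d = pad[bi:bi + 5]
--             d[2] = "_"
--             data.append(d)
--             lable.append(sen[bi])
--     return data, lable
-- ===== Notes on version B (the rewrite author's own statement) =====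
-- stated objective: simpler
-- what changed: B pads each sentence with two blanks on each side and takes 5-wide slices, replacing A's per-cell bounds-checked inner loop over five indices, and appends each window/label directly instead of A's repeated whole-list concatenation data = data + d.
import Mathlib
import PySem

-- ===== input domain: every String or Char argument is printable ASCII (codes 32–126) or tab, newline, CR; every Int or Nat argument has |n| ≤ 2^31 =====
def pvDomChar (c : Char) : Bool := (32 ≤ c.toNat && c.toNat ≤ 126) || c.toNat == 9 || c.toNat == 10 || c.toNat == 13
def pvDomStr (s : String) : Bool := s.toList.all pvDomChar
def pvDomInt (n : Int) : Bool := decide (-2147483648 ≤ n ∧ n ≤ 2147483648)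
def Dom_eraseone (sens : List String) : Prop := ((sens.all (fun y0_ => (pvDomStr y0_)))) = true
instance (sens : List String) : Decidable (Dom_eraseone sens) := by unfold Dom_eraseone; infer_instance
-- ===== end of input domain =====

-- B replaces A's bounds-checked inner loop with slicing over a 2-blank-padded list: simpler, no per-cell index checks.

-- ===== PORT A =====
-- A's helper eraseline: for each center bi, start from five blanks and overwrite
-- the in-range cells one by one, then erase the center.
def eraseline (sen : List Char) : List (List String) × List String :=
  (List.range sen.length).foldl
    (fun (acc : List (List String) × List String) bi =>
      let d0 : List String := [" ", " ", " ", " ", " "]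
      let tgt : String := String.mk [sen.getD bi ' ']          -- sen[bi], bi in range
      let d : List String :=
        (List.range 5).foldl
          (fun d (i : Nat) =>
            let si : Int := (bi : Int) - 2 + (i : Int)
            if si < 0 ∨ (sen.length : Int) ≤ si then d
            else d.set i (String.mk [sen.getD si.toNat ' ']))  -- sen[si], 0 ≤ si < len
          d0
      (acc.1 ++ [d.set 2 "_"], acc.2 ++ [tgt]))
    ([], [])

def eraseone (sens : List String) : List (List String) × List String :=
  sens.foldl
    (fun (acc : List (List String) × List String) sen =>
      let cs := sen.toList
      if cs.length < 3 then acc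
      else
        let dt := eraseline cs
        (acc.1 ++ dt.1, acc.2 ++ dt.2))
    ([], [])

-- ===== PORT B =====
def eraseone_alt (sens : List String) : List (List String) × List String :=
  sens.foldl
    (fun (acc : List (List String) × List String) sen =>
      let cs := sen.toList
      if cs.length < 3 then acc
      else
        let pad : List Char := [' ', ' '] ++ cs ++ [' ', ' ']
        (List.range cs.length).foldl
          (fun (acc : List (List String) × List String) bi =>
            -- pad[bi:bi+5]: 0 ≤ bi and bi+5 ≤ pad.length, so drop/take is exact here
            let d : List String := ((pad.drop bi).take 5).map (fun c => String.mk [c])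
            (acc.1 ++ [d.set 2 "_"], acc.2 ++ [String.mk [cs.getD bi ' ']]))  -- sen[bi]
          acc)
    ([], [])

-- ===== PRECONDITION & SPEC =====
def Spec_eraseone (sens : List String) (out : List (List String) × List String) : Prop := out = eraseone_alt sens
instance (sens : List String) (out : List (List String) × List String) : Decidable (Spec_eraseone sens out) := by unfold Spec_eraseone; infer_instance

-- ===== CLAIM (what is proved, stated in full; the proofs are below) =====
def Claim_equal_eraseone : Prop := ∀ (sens : List String), Dom_eraseone sens → Spec_eraseone sens (eraseone sens)

-- ===== LEMMAS AND PROOFS =====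

-- a pair-fold that appends one element to each component is the pair of maps
theorem foldl_pair_append {α β γ : Type} (l : List α) (f : α → β) (g : α → γ)
    (a : List β) (b : List γ) :
    l.foldl (fun (acc : List β × List γ) x => (acc.1 ++ [f x], acc.2 ++ [g x])) (a, b)
      = (a ++ l.map f, b ++ l.map g) := by
  induction l generalizing a b with
  | nil => simp
  | cons x xs ih => simp [List.foldl, ih, List.append_assoc]

-- A's windows in closed form: component i of the window at center bi
theorem winA_closed (cs : List Char) (bi : Nat) :
    (List.range 5).foldl
        (fun (d : List String) (i : Nat) =>
          let si : Int := (bi : Int) - 2 + (i : Int)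
          if si < 0 ∨ (cs.length : Int) ≤ si then d
          else d.set i (String.mk [cs.getD si.toNat ' ']))
        [" ", " ", " ", " ", " "]
      = (List.range 5).map (fun (i : Nat) =>
          let si : Int := (bi : Int) - 2 + (i : Int)
          if si < 0 ∨ (cs.length : Int) ≤ si then " "
          else String.mk [cs.getD si.toNat ' ']) := by
  simp only [show List.range 5 = [0, 1, 2, 3, 4] from rfl, List.foldl, List.map]
  split_ifs <;> rfl

theorem getD_pad (cs : List Char) (k : Nat) :
    (([' ', ' '] ++ cs ++ [' ', ' ']) : List Char).getD k ' '
      = if k < 2 then ' '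
        else if k - 2 < cs.length then cs.getD (k - 2) ' ' else ' ' := by
  rcases k with _ | (_ | k)
  · simp
  · simp
  · simp only [List.cons_append, List.nil_append, List.getD_cons_succ]
    have h2 : ¬ (k + 1 + 1 < 2) := by omega
    have h3 : k + 1 + 1 - 2 = k := by omega
    rw [if_neg h2, h3]
    by_cases h : k < cs.length
    · rw [if_pos h]
      simp [List.getD_eq_getElem?_getD, List.getElem?_append_left h]
    · rw [if_neg h]
      rw [List.getD_eq_getElem?_getD, List.getElem?_append_right (by omega)]
      rcases hm : k - cs.length with _ | (_ | m) <;> simp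

-- take 5 of a drop, fully in range, written out as five getD's
theorem take5_drop {α : Type} [Inhabited α] (l : List α) (bi : Nat) (x : α)
    (h : bi + 5 ≤ l.length) :
    ((l.drop bi).take 5)
      = [l.getD bi x, l.getD (bi+1) x, l.getD (bi+2) x, l.getD (bi+3) x, l.getD (bi+4) x] := by
  apply List.ext_getElem
  · simp; omega
  · intro i h1 h2
    simp only [List.length_take, List.length_drop] at h1
    have hi : i < 5 := by omega
    have hbl : bi + i < l.length := by omega
    rw [List.getElem_take, List.getElem_drop]
    interval_cases i <;>
      · simp only [List.getElem_cons_zero, List.getElem_cons_succ, List.getD_eq_getElem?_getD]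
        rw [List.getElem?_eq_getElem (by omega)]
        rfl

-- the two per-center windows coincide (for bi < cs.length)
theorem window_eq (cs : List Char) (bi : Nat) (hbi : bi < cs.length) :
    (List.range 5).map (fun (i : Nat) =>
        let si : Int := (bi : Int) - 2 + (i : Int)
        if si < 0 ∨ (cs.length : Int) ≤ si then " "
        else String.mk [cs.getD si.toNat ' '])
      = (((([' ', ' '] ++ cs ++ [' ', ' ']) : List Char).drop bi).take 5).map
          (fun c => String.mk [c]) := by
  have hlen : bi + 5 ≤ ([' ', ' '] ++ cs ++ [' ', ' '] : List Char).length := by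
    simp; omega
  rw [take5_drop _ _ ' ' hlen]
  simp only [show List.range 5 = [0, 1, 2, 3, 4] from rfl, List.map, getD_pad]
  refine List.ext_getElem (by simp) ?_
  intro i h1 h2
  have hi : i < 5 := by simpa using h2
  interval_cases i <;>
    · simp only [List.getElem_cons_zero, List.getElem_cons_succ]
      split_ifs <;>
        first
          | rfl
          | (exfalso; omega)
          | (congr 3 <;> first | rfl | omega)

-- per-sentence: eraseline equals B's inner fold contribution
theorem step_eq (acc : List (List String) × List String) (cs : List Char) :
    (acc.1 ++ (eraseline cs).1, acc.2 ++ (eraseline cs).2)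
      = (List.range cs.length).foldl
          (fun (acc : List (List String) × List String) bi =>
            let d : List String :=
              ((((([' ', ' '] ++ cs ++ [' ', ' ']) : List Char).drop bi).take 5).map
                (fun c => String.mk [c]))
            (acc.1 ++ [d.set 2 "_"], acc.2 ++ [String.mk [cs.getD bi ' ']]))
          acc := by
  unfold eraseline
  rw [foldl_pair_append, foldl_pair_append]
  obtain ⟨a, b⟩ := acc
  simp only [List.nil_append, Prod.mk.injEq]
  refine ⟨?_, trivial⟩
  congr 1
  apply List.map_congr_left
  intro bi hbi
  have hbi' : bi < cs.length := List.mem_range.mp hbi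
  simp only [winA_closed, window_eq cs bi hbi']

-- ===== VERDICT (by name: the statement is the Claim_ definition above) =====
theorem eraseone_spec : Claim_equal_eraseone := by
  intro sens _
  show eraseone sens = eraseone_alt sens
  unfold eraseone eraseone_alt
  apply PySem.List.foldl_congr_mem
  intro acc sen _
  by_cases h : sen.toList.length < 3
  · rw [if_pos h, if_pos h]
  · rw [if_neg h, if_neg h]
    exact step_eq acc sen.toList
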